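-- pv_equiv track=rewrite | github.com/mirenk0/Algorithmic-Problems | 9-Search_Problems/getsum.py | count
-- ===== SOURCE A (Python) =====
-- import itertools
--
-- def count(n, k, x):
--     if k < 0 or x < k or x > n*k or n > 10 or k > n:
--         return 0
--     if k == 1:
--         return 1 if x <= n else 0
--     res = 0
--     nums = [i for i in range(1, n+1)]
--     for subset in itertools.combinations(nums, k):
--         if sum(subset) == x:
--             res += 1
--     return res
-- ===== SOURCE B (Python) =====
-- def count(n, k, x):
--     if k < 0 or x < k or x > n*k or n > 10 or k > n:
--         return 0
--     memo = {}
--     def c(v, j, s):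
--         # number of j-element subsets of {1..v} with sum s
--         if j < 0 or s < 0:
--             return 0
--         if v == 0:
--             return 1 if j == 0 and s == 0 else 0
--         if (v, j, s) not in memo:
--             memo[(v, j, s)] = c(v - 1, j, s) + c(v - 1, j - 1, s - v)
--         return memo[(v, j, s)]
--     return c(n, k, x)
-- ===== Notes on version B (the rewrite author's own statement) =====
-- stated objective: faster
-- what changed: Replaced the itertools.combinations enumeration of all k-subsets by the memoized 0/1-knapsack counting recurrence c(v,j,s)=c(v-1,j,s)+c(v-1,j-1,s-v), keeping A's guards verbatim.
import Mathlib
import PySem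

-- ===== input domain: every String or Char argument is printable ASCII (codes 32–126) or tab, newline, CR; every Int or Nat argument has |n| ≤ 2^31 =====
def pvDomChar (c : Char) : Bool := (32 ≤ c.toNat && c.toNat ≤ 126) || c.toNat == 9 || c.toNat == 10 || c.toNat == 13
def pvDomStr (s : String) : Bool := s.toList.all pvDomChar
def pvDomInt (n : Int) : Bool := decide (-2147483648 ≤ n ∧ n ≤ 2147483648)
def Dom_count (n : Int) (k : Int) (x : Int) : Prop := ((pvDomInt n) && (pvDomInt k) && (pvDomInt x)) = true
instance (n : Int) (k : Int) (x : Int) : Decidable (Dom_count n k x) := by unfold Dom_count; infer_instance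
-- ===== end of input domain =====

-- B replaces A's itertools.combinations enumeration by the 0/1-knapsack counting
-- recurrence c(v,j,s) = c(v-1,j,s) + c(v-1,j-1,s-v) (memoized in Python); A's guards are kept.

-- ===== PORT A =====
-- itertools.combinations(nums, k): all k-element sublists, in itertools' order
def pyCombos : List Int → Nat → List (List Int)
  | _, 0 => [[]]
  | [], _ + 1 => []
  | a :: l, j + 1 => (pyCombos l j).map (a :: ·) ++ pyCombos l (j + 1)

def count (n : Int) (k : Int) (x : Int) : Int :=
  if k < 0 ∨ x < k ∨ x > n * k ∨ n > 10 ∨ k > n then 0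
  else if k = 1 then (if x ≤ n then 1 else 0)
  else
    let nums := PySem.List.pyRange 1 (n + 1) 1
    (pyCombos nums k.toNat).foldl (fun res subset => if subset.sum = x then res + 1 else res) 0

-- ===== PORT B =====
-- Source B's helper c(v, j, s): number of j-element subsets of {1..v} with sum s
-- (the memo dict only caches values; the port is the same pure recurrence)
def cRec : Nat → Int → Int → Int
  | 0, j, s => if j < 0 ∨ s < 0 then 0 else if j = 0 ∧ s = 0 then 1 else 0
  | w + 1, j, s =>
    if j < 0 ∨ s < 0 then 0
    else cRec w j s + cRec w (j - 1) (s - ((w : Int) + 1))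

def count_alt (n : Int) (k : Int) (x : Int) : Int :=
  if k < 0 ∨ x < k ∨ x > n * k ∨ n > 10 ∨ k > n then 0
  else cRec n.toNat k x

-- ===== PRECONDITION & SPEC =====
def Spec_count (n : Int) (k : Int) (x : Int) (out : Int) : Prop := out = count_alt n k x
instance (n : Int) (k : Int) (x : Int) (out : Int) : Decidable (Spec_count n k x out) := by unfold Spec_count; infer_instance

-- ===== CLAIM (what is proved, stated in full; the proofs are below) =====
def Claim_equal_count : Prop := ∀ (n : Int) (k : Int) (x : Int), Dom_count n k x → Spec_count n k x (count n k x)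

-- ===== LEMMAS AND PROOFS =====
-- pvG l j s: how many j-element sublists of l (in A's combination list) sum to s
def pvG (l : List Int) (j : Nat) (s : Int) : Nat :=
  (pyCombos l j).countP (fun t => decide (t.sum = s))

theorem pvG_zero (l : List Int) (s : Int) : pvG l 0 s = if s = 0 then 1 else 0 := by
  simp only [pvG, pyCombos, List.countP_cons, List.countP_nil, List.sum_nil]
  by_cases h : s = 0 <;> simp [h, eq_comm]

theorem pvG_cons (b : Int) (l : List Int) (j : Nat) (s : Int) :
    pvG (b :: l) (j + 1) s = pvG l j (s - b) + pvG l (j + 1) s := by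
  simp only [pvG, pyCombos, List.countP_append, List.countP_map]
  congr 1
  apply List.countP_congr
  intro t _
  simp only [Function.comp_apply, List.sum_cons, decide_eq_true_eq]
  omega

theorem pvCombos_sum_nonneg : ∀ (l : List Int) (j : Nat) (t : List Int),
    (∀ y ∈ l, 0 ≤ y) → t ∈ pyCombos l j → 0 ≤ t.sum := by
  intro l
  induction l with
  | nil =>
    intro j t _ ht
    cases j
    · simp [pyCombos] at ht; simp [ht]
    · simp [pyCombos] at ht
  | cons a l ih =>
    intro j t hpos ht
    cases j with
    | zero => simp [pyCombos] at ht; simp [ht]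
    | succ j =>
      simp only [pyCombos, List.mem_append, List.mem_map] at ht
      rcases ht with ⟨u, hu, rfl⟩ | ht
      · have h1 : 0 ≤ u.sum := ih j u (fun y hy => hpos y (List.mem_cons_of_mem a hy)) hu
        have h2 : 0 ≤ a := hpos a List.mem_cons_self
        simp only [List.sum_cons]; omega
      · exact ih (j + 1) t (fun y hy => hpos y (List.mem_cons_of_mem a hy)) ht

theorem pvG_neg (l : List Int) (j : Nat) (s : Int) (hpos : ∀ y ∈ l, 0 ≤ y) (hs : s < 0) :
    pvG l j s = 0 := by
  apply List.countP_eq_zero.mpr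
  intro t ht
  have := pvCombos_sum_nonneg l j t hpos ht
  simp only [decide_eq_true_eq]
  omega

theorem pvG_append (a : Int) : ∀ (l : List Int) (j : Nat) (s : Int),
    pvG (l ++ [a]) (j + 1) s = pvG l (j + 1) s + pvG l j (s - a) := by
  intro l
  induction l with
  | nil =>
    intro j s
    rw [List.nil_append]
    have h1 : pvG (a :: ([] : List Int)) (j + 1) s
        = pvG ([] : List Int) j (s - a) + pvG ([] : List Int) (j + 1) s := pvG_cons a [] j s
    rw [h1]
    cases j with
    | zero => rw [pvG_zero]; exact Nat.add_comm _ _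
    | succ j => simp [pvG, pyCombos]
  | cons b l ih =>
    intro j s
    have hhead : ((b :: l) ++ [a]) = b :: (l ++ [a]) := rfl
    rw [hhead, pvG_cons, pvG_cons]
    cases j with
    | zero =>
      rw [ih 0 s]
      simp only [pvG_zero]
      split_ifs <;> omega
    | succ j =>
      rw [ih (j + 1) s, ih j (s - b), pvG_cons]
      have hc : s - b - a = s - a - b := by omega
      rw [hc]
      omega

theorem cRec_neg (v : Nat) (j : Int) (s : Int) (h : j < 0 ∨ s < 0) : cRec v j s = 0 := by
  cases v <;> simp [cRec, h]

theorem range_nonneg (v : Nat) : ∀ y ∈ PySem.List.pyRange 1 ((v : Int) + 1) 1, 0 ≤ y := by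
  intro y hy
  rw [PySem.List.mem_pyRange_one] at hy
  omega

theorem pvG_cRec : ∀ (v : Nat) (j : Nat) (s : Int), 0 ≤ s →
    cRec v (j : Int) s = (pvG (PySem.List.pyRange 1 ((v : Int) + 1) 1) j s : Int) := by
  intro v
  induction v with
  | zero =>
    intro j s hs
    rw [PySem.List.pyRange_one_eq_nil (by omega)]
    cases j with
    | zero => simp [cRec, pvG_zero, hs]
    | succ j =>
      simp only [cRec, pvG, pyCombos, List.countP_nil]
      rw [if_neg (by push Not; omega)]
      rw [if_neg (by push Not; omega)]
      simp
  | succ v ih =>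
    intro j s hs
    have hsplit : PySem.List.pyRange 1 (((v : Nat) + 1 : Nat) + 1) 1
        = PySem.List.pyRange 1 ((v : Int) + 1) 1 ++ [(v : Int) + 1] := by
      have h1 : (((v : Nat) + 1 : Nat) : Int) + 1 = ((v : Int) + 1) + 1 := by push_cast; ring
      rw [h1, PySem.List.pyRange_one_succ_right (by omega)]
    rw [hsplit]
    cases j with
    | zero =>
      simp only [Nat.cast_zero]
      have hstep : cRec (v + 1) (0 : Int) s
          = cRec v 0 s + cRec v (-1) (s - ((v : Int) + 1)) := by
        show (if (0 : Int) < 0 ∨ s < 0 then 0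
          else cRec v 0 s + cRec v (0 - 1) (s - ((v : Int) + 1))) = _
        rw [if_neg (by push Not; omega)]
        norm_num
      rw [hstep, cRec_neg v (-1) _ (Or.inl (by omega)), pvG_zero]
      have h0 := ih 0 s hs
      rw [pvG_zero] at h0
      simp only [Nat.cast_zero] at h0
      omega
    | succ j =>
      have hstep2 : cRec (v + 1) ((j + 1 : Nat) : Int) s
          = cRec v ((j + 1 : Nat) : Int) s
            + cRec v (((j + 1 : Nat) : Int) - 1) (s - ((v : Int) + 1)) := by
        show (if ((j + 1 : Nat) : Int) < 0 ∨ s < 0 then 0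
          else cRec v ((j + 1 : Nat) : Int) s
            + cRec v (((j + 1 : Nat) : Int) - 1) (s - ((v : Int) + 1))) = _
        rw [if_neg (by push Not; constructor <;> omega)]
      have hcast : (((j + 1 : Nat) : Int) - 1) = ((j : Nat) : Int) := by push_cast; ring
      rw [hstep2, hcast, pvG_append, ih (j + 1) s hs]
      by_cases hsv : 0 ≤ s - ((v : Int) + 1)
      · rw [ih j _ hsv]; push_cast; ring
      · rw [cRec_neg v _ _ (Or.inr (by omega))]
        rw [pvG_neg _ j _ (range_nonneg v) (by omega)]
        push_cast; ring

theorem pvFoldl_count (x : Int) : ∀ (L : List (List Int)) (a : Int),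
    L.foldl (fun res subset => if subset.sum = x then res + 1 else res) a
      = a + (L.countP (fun t => decide (t.sum = x)) : Int) := by
  intro L
  induction L with
  | nil => intro a; simp
  | cons t L ih =>
    intro a
    simp only [List.foldl_cons, List.countP_cons, ih]
    by_cases h : t.sum = x
    · simp [h]; ring
    · simp [h]

theorem pvG_one : ∀ (v : Nat) (x : Int),
    pvG (PySem.List.pyRange 1 ((v : Int) + 1) 1) 1 x
      = if 1 ≤ x ∧ x ≤ (v : Int) then 1 else 0 := by
  intro v
  induction v with
  | zero =>
    intro x
    rw [PySem.List.pyRange_one_eq_nil (by omega)]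
    simp only [pvG, pyCombos, List.countP_nil]
    rw [if_neg (by omega)]
  | succ v ih =>
    intro x
    have hsplit : PySem.List.pyRange 1 (((v : Nat) + 1 : Nat) + 1) 1
        = PySem.List.pyRange 1 ((v : Int) + 1) 1 ++ [(v : Int) + 1] := by
      have h1 : (((v : Nat) + 1 : Nat) : Int) + 1 = ((v : Int) + 1) + 1 := by push_cast; ring
      rw [h1, PySem.List.pyRange_one_succ_right (by omega)]
    rw [hsplit]
    have := pvG_append ((v : Int) + 1) (PySem.List.pyRange 1 ((v : Int) + 1) 1) 0 x
    rw [this, ih x, pvG_zero]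
    push_cast
    split_ifs <;> omega

-- ===== VERDICT (by name: the statement is the Claim_ definition above) =====
theorem count_spec : Claim_equal_count := by
  intro n k x _
  unfold Spec_count
  by_cases h : k < 0 ∨ x < k ∨ x > n * k ∨ n > 10 ∨ k > n
  · simp only [count, count_alt, if_pos h]
  · push Not at h
    obtain ⟨hk0, hxk, hxnk, hn10, hkn⟩ := h
    have hn0 : (0 : Int) ≤ n := le_trans hk0 hkn
    have hx0 : (0 : Int) ≤ x := le_trans hk0 hxk
    have hkk : ((k.toNat : Int)) = k := Int.toNat_of_nonneg hk0
    have hnn : ((n.toNat : Int)) = n := Int.toNat_of_nonneg hn0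
    have halt : count_alt n k x = (pvG (PySem.List.pyRange 1 (n + 1) 1) k.toNat x : Int) := by
      unfold count_alt
      rw [if_neg (by push Not; exact ⟨hk0, hxk, hxnk, hn10, hkn⟩)]
      conv_lhs => rw [← hkk]
      rw [pvG_cRec n.toNat k.toNat x hx0, hnn]
    rw [halt]
    unfold count
    rw [if_neg (by push Not; exact ⟨hk0, hxk, hxnk, hn10, hkn⟩)]
    by_cases hk1 : k = 1
    · rw [if_pos hk1]
      have hxn : x ≤ n := by
        have : n * k = n := by rw [hk1]; ring
        omega
      rw [if_pos hxn]
      have hk1n : k.toNat = 1 := by omega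
      rw [hk1n, ← hnn, pvG_one n.toNat x]
      rw [if_pos (by constructor <;> omega)]
      norm_num
    · rw [if_neg hk1]
      simp only []
      rw [pvFoldl_count x (pyCombos (PySem.List.pyRange 1 (n + 1) 1) k.toNat) 0]
      simp [pvG]
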